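-- pv_equiv track=rewrite | github.com/Somnef/merkle_tree | merkle_tree.py | pair_concat
-- ===== SOURCE A (Python) =====
-- def pair_concat(l):
--     new_l = []
--     for i in range(0, len(l), 2):
--         if i != len(l) - 1:
--             new_l.append(l[i] + l[i+1])
--         else:
--             new_l.append(l[i] + l[i])
--
--     return new_l
-- ===== SOURCE B (Python) =====
-- def pair_concat(l):
--     p = l + l[-1:] if len(l) % 2 else l
--     return [a + b for a, b in zip(p[::2], p[1::2])]
-- ===== Notes on version B (the rewrite author's own statement) =====
-- stated objective: idiomatic
-- what changed: Replaces the indexed step-2 loop with an end-of-list test inside the loop by staged whole-list passes: first pad the list to even length by appending a copy of its last element, then split it into the even-index and odd-index strided slices and zip them into concatenated pairs.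
import Mathlib
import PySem

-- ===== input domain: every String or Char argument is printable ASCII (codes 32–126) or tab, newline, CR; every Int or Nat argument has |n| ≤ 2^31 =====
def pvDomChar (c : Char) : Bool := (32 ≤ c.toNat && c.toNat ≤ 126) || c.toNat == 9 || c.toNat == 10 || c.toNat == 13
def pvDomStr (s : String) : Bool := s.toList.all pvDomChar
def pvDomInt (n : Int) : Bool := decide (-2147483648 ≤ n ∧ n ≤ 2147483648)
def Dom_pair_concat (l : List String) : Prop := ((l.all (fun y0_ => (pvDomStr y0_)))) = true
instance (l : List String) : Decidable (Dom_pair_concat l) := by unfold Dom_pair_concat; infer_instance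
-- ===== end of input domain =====

-- B replaces A's indexed step-2 loop (with its end-of-list test) by staged passes: pad to even length, split into even/odd strided slices, zip-concatenate (more idiomatic, same cost).


-- ===== PORT A =====
-- l[i] ported as pyGetD: every index the loop reads is in range, so this equals Python's l[i]
def pair_concat (l : List String) : List String :=
  (PySem.List.pyRange 0 (PySem.List.len l) 2).foldl
    (fun new_l i =>
      if i ≠ PySem.List.len l - 1 then
        new_l ++ [PySem.List.pyGetD l i "" ++ PySem.List.pyGetD l (i + 1) ""]
      else
        new_l ++ [PySem.List.pyGetD l i "" ++ PySem.List.pyGetD l i ""]) []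

-- ===== PORT B =====
-- p = l + l[-1:] if len(l) % 2 else l; then [a + b for a, b in zip(p[::2], p[1::2])]
-- (slice? always returns some here since the step 2 ≠ 0, so getD [] is exact)
def pair_concat_alt (l : List String) : List String :=
  let p := if PySem.List.len l % 2 ≠ 0 then l ++ PySem.List.slice l (some (-1)) none else l
  let evens := (PySem.List.slice? p none none 2).getD []
  let odds := (PySem.List.slice? p (some 1) none 2).getD []
  (evens.zip odds).map (fun ab => ab.1 ++ ab.2)

-- ===== PRECONDITION & SPEC =====
def Spec_pair_concat (l : List String) (out : List String) : Prop := out = pair_concat_alt l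
instance (l : List String) (out : List String) : Decidable (Spec_pair_concat l out) := by unfold Spec_pair_concat; infer_instance

-- ===== CLAIM (what is proved, stated in full; the proofs are below) =====
def Claim_equal_pair_concat : Prop := ∀ (l : List String), Dom_pair_concat l → Spec_pair_concat l (pair_concat l)

-- ===== LEMMAS AND PROOFS =====

theorem len_eq (l : List String) : PySem.List.len l = (l.length : Int) := by
  simp [PySem.List.len]

-- the loop body of A, as a function of the index
def bodyA (l : List String) (i : Int) : String :=
  if i ≠ PySem.List.len l - 1 then
    PySem.List.pyGetD l i "" ++ PySem.List.pyGetD l (i + 1) ""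
  else
    PySem.List.pyGetD l i "" ++ PySem.List.pyGetD l i ""

-- proof-side normal form: the two-at-a-time recursion both ports are reduced to
def pairRec : List String → List String
  | [] => []
  | [a] => [a ++ a]
  | a :: b :: r => (a ++ b) :: pairRec r

-- the even-index strided subsequence xs[::2], structurally
def everyOther {α : Type} : List α → List α
  | [] => []
  | [a] => [a]
  | a :: _ :: r => a :: everyOther r

-- xs[::2] as an index map (what slice? computes)
def gIdx {α : Type} (xs : List α) : List α :=
  (List.range ((xs.length + 1) / 2)).filterMap (fun k => xs[2 * k]?)

theorem gIdx_nil {α : Type} : gIdx ([] : List α) = [] := by simp [gIdx]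

theorem gIdx_single {α : Type} (a : α) : gIdx [a] = [a] := by simp [gIdx]

theorem gIdx_pair {α : Type} (a b : α) (r : List α) :
    gIdx (a :: b :: r) = a :: gIdx r := by
  unfold gIdx
  have hc : (((a :: b :: r).length + 1) / 2) = (r.length + 1) / 2 + 1 := by
    simp only [List.length_cons]; omega
  rw [hc, List.range_succ_eq_map]
  simp only [List.filterMap_cons, List.filterMap_map, Nat.mul_zero,
    List.getElem?_cons_zero]
  congr 1

theorem gIdx_eq_everyOther {α : Type} (xs : List α) : gIdx xs = everyOther xs := by
  induction xs using everyOther.induct with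
  | case1 => exact gIdx_nil
  | case2 a => exact gIdx_single a
  | case3 a b r ih => rw [gIdx_pair, ih, everyOther]

theorem slice?_step2_from0 {α : Type} (xs : List α) :
    PySem.List.slice? xs none none 2 = some (everyOther xs) := by
  rw [← gIdx_eq_everyOther]
  unfold PySem.List.slice? PySem.List.sliceIndices gIdx
  simp only [if_neg (by norm_num : ¬ (2 : Int) = 0)]
  norm_num
  have hc : (if 0 < xs.length then (((xs.length : Int) + 2 - 1) / 2).toNat else 0)
      = (xs.length + 1) / 2 := by split_ifs <;> omega
  rw [hc]
  apply List.filterMap_congr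
  intro k _
  have h : ((2 : Int) * (k : Nat)).toNat = 2 * k := by omega
  rw [h]

theorem slice?_step2_from1 {α : Type} (xs : List α) :
    PySem.List.slice? xs (some 1) none 2 = some (everyOther xs.tail) := by
  match xs with
  | [] => rfl
  | x :: t =>
    rw [List.tail_cons, ← gIdx_eq_everyOther]
    unfold PySem.List.slice? PySem.List.sliceIndices gIdx
    simp only [if_neg (by norm_num : ¬ (2 : Int) = 0)]
    norm_num
    have hc : (if 0 < t.length then (((t.length : Int) + 2 - 1) / 2).toNat else 0)
        = (t.length + 1) / 2 := by split_ifs <;> omega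
    rw [hc]
    apply List.filterMap_congr
    intro k _
    have h : ((1 : Int) + 2 * (k : Nat)).toNat = 2 * k + 1 := by omega
    rw [h, List.getElem?_cons_succ]

theorem everyOther_cons_tail {α : Type} (b : α) (r : List α) :
    everyOther (b :: r) = b :: everyOther r.tail := by
  cases r <;> rfl

-- B reduced to pairRec
theorem alt_eq_pairRec (l : List String) : pair_concat_alt l = pairRec l := by
  unfold pair_concat_alt
  simp only [slice?_step2_from0, slice?_step2_from1, Option.getD_some]
  induction l using pairRec.induct with
  | case1 => rfl
  | case2 a =>
    have hcond : PySem.List.len [a] % 2 ≠ 0 := by rw [len_eq]; norm_num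
    rw [if_pos hcond, PySem.List.slice_from_neg_one]
    rfl
  | case3 a b r ih =>
    have hpar : (PySem.List.len (a :: b :: r) % 2 ≠ 0) ↔ (PySem.List.len r % 2 ≠ 0) := by
      rw [len_eq, len_eq]; simp only [List.length_cons]; push_cast; omega
    have hstep : (if PySem.List.len (a :: b :: r) % 2 ≠ 0 then
          (a :: b :: r) ++ PySem.List.slice (a :: b :: r) (some (-1)) none else a :: b :: r)
        = a :: b :: (if PySem.List.len r % 2 ≠ 0 then
          r ++ PySem.List.slice r (some (-1)) none else r) := by
      by_cases hc : PySem.List.len r % 2 ≠ 0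
      · rw [if_pos (hpar.mpr hc), if_pos hc,
          PySem.List.slice_from_neg_one, PySem.List.slice_from_neg_one]
        have hr : r ≠ [] := by
          intro h; subst h; rw [len_eq] at hc; norm_num at hc
        simp only [List.length_cons, List.cons_append]
        congr 2
        have hlen : r.length + 1 + 1 - 1 = (r.length - 1) + 1 + 1 := by
          cases r with
          | nil => exact absurd rfl hr
          | cons x t => simp
        rw [hlen, List.drop_succ_cons, List.drop_succ_cons]
      · rw [if_neg (fun h => hc (hpar.mp h)), if_neg hc]
    rw [hstep]
    set pr := (if PySem.List.len r % 2 ≠ 0 then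
      r ++ PySem.List.slice r (some (-1)) none else r) with hpr
    rw [everyOther, List.tail_cons, everyOther_cons_tail,
      List.zip_cons_cons, List.map_cons, pairRec]
    exact List.cons_eq_cons.mpr ⟨rfl, ih⟩

-- ===== A reduced to pairRec (via its loop as a map over indices) =====

-- A's loop as a map over the Nat indices k ↦ i = 2*k
theorem pair_concat_eq_map (l : List String) :
    pair_concat l =
      (List.range (((PySem.List.len l + 1) / 2).toNat)).map
        (fun (k : Nat) => bodyA l (2 * (k : Int))) := by
  unfold pair_concat
  rw [PySem.List.pyRange_of_pos 0 (PySem.List.len l) (by norm_num), List.foldl_map]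
  have hfun : (fun (new_l : List String) (k : Nat) =>
      if (0 + 2 * (k : Int)) ≠ PySem.List.len l - 1 then
        new_l ++ [PySem.List.pyGetD l (0 + 2 * (k : Int)) "" ++ PySem.List.pyGetD l (0 + 2 * (k : Int) + 1) ""]
      else
        new_l ++ [PySem.List.pyGetD l (0 + 2 * (k : Int)) "" ++ PySem.List.pyGetD l (0 + 2 * (k : Int)) ""])
    = (fun (new_l : List String) (k : Nat) => new_l ++ [bodyA l (2 * (k : Int))]) := by
    funext acc k; simp only [zero_add, bodyA]; split_ifs <;> rfl
  rw [hfun, PySem.List.foldl_append_singleton_eq_map, List.nil_append]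
  have h0 : (0 : Int) ≤ PySem.List.len l := by rw [len_eq]; positivity
  have hc : (if (0 : Int) < PySem.List.len l
        then ((PySem.List.len l - 0 + 2 - 1) / 2).toNat else 0)
      = ((PySem.List.len l + 1) / 2).toNat := by
    split_ifs <;> omega
  rw [hc]

theorem map_range_step (a b : String) (r : List String) :
    (List.range (((PySem.List.len (a :: b :: r) + 1) / 2).toNat)).map
        (fun (k : Nat) => bodyA (a :: b :: r) (2 * (k : Int)))
    = (a ++ b) ::
      (List.range (((PySem.List.len r + 1) / 2).toNat)).map
        (fun (k : Nat) => bodyA r (2 * (k : Int))) := by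
  have hcnt : ((PySem.List.len (a :: b :: r) + 1) / 2).toNat
      = ((PySem.List.len r + 1) / 2).toNat + 1 := by
    rw [len_eq, len_eq]; simp only [List.length_cons]; push_cast; omega
  rw [hcnt, List.range_succ_eq_map, List.map_cons, List.map_map]
  have hg : ∀ m : Nat, PySem.List.pyGetD (a :: b :: r) ((m : Int) + 2) ""
      = PySem.List.pyGetD r (m : Int) "" := by
    intro m
    have h2 : ((m : Int) + 2) = ((m + 2 : Nat) : Int) := by push_cast; ring
    rw [h2, PySem.List.pyGetD_natCast, PySem.List.pyGetD_natCast]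
    rfl
  congr 1
  · -- head: k = 0, index i = 0 ≠ len-1 since len ≥ 2
    unfold bodyA
    rw [if_pos]
    · have h0 : PySem.List.pyGetD (a :: b :: r) (2 * ((0 : Nat) : Int)) "" = a := by
        norm_num [PySem.List.pyGetD_natCast]
      have h1 : PySem.List.pyGetD (a :: b :: r) (2 * ((0 : Nat) : Int) + 1) "" = b := by
        have h2 : (2 * ((0 : Nat) : Int) + 1) = ((1 : Nat) : Int) := by norm_num
        rw [h2, PySem.List.pyGetD_natCast]; rfl
      rw [h0, h1]
    · rw [len_eq]; simp only [List.length_cons]; push_cast; omega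
  · apply List.map_congr_left
    intro k _
    show bodyA (a :: b :: r) (2 * ((Nat.succ k : Nat) : Int)) = bodyA r (2 * (k : Int))
    have hcond : ((2 * ((Nat.succ k : Nat) : Int)) ≠ PySem.List.len (a :: b :: r) - 1)
        ↔ ((2 * ((k : Nat) : Int)) ≠ PySem.List.len r - 1) := by
      rw [len_eq, len_eq]; simp only [List.length_cons]; push_cast; omega
    have g1 : PySem.List.pyGetD (a :: b :: r) (2 * ((Nat.succ k : Nat) : Int)) ""
        = PySem.List.pyGetD r (2 * (k : Int)) "" := by
      have e1 : (2 * ((Nat.succ k : Nat) : Int)) = ((2 * k : Nat) : Int) + 2 := by push_cast; ring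
      rw [e1, hg]
      norm_cast
    have g2 : PySem.List.pyGetD (a :: b :: r) (2 * ((Nat.succ k : Nat) : Int) + 1) ""
        = PySem.List.pyGetD r (2 * (k : Int) + 1) "" := by
      have e2 : (2 * ((Nat.succ k : Nat) : Int) + 1) = ((2 * k + 1 : Nat) : Int) + 2 := by push_cast; ring
      rw [e2, hg]
      norm_cast
    unfold bodyA
    by_cases hc : (2 * ((k : Nat) : Int)) ≠ PySem.List.len r - 1
    · rw [if_pos (hcond.mpr hc), if_pos hc, g1, g2]
    · rw [if_neg (fun h => hc (hcond.mp h)), if_neg hc, g1]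

theorem pair_concat_eq_pairRec (l : List String) : pair_concat l = pairRec l := by
  rw [pair_concat_eq_map]
  induction hn : l.length using Nat.strong_induction_on generalizing l with
  | _ n ih =>
    match l with
    | [] => simp [PySem.List.len, pairRec]
    | [a] =>
      have hc : ((PySem.List.len [a] + 1) / 2).toNat = 1 := by rw [len_eq]; simp
      rw [hc]
      simp only [List.range_one, List.map_cons, List.map_nil, pairRec, bodyA]
      have hneg : ¬((2 * ((0 : Nat) : Int)) ≠ PySem.List.len [a] - 1) := by
        rw [len_eq]; norm_num
      have h0 : PySem.List.pyGetD [a] (2 * ((0 : Nat) : Int)) "" = a := by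
        norm_num [PySem.List.pyGetD_natCast]
      rw [if_neg hneg, h0]
    | a :: b :: r =>
      rw [map_range_step a b r, pairRec]
      congr 1
      exact ih r.length (by simp at hn; omega) r rfl

-- ===== VERDICT (by name: the statement is the Claim_ definition above) =====
theorem pair_concat_spec : Claim_equal_pair_concat := by
  intro l _
  unfold Spec_pair_concat
  rw [pair_concat_eq_pairRec, alt_eq_pairRec]
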